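-- pv_equiv track=rewrite | github.com/YavuzVoid/algorithm-solutions | hackerrank/medium/longest_arithmetic_subsequence_given_difference.py | findLongestArithmeticProgression
-- ===== SOURCE A (Python) =====
-- def findLongestArithmeticProgression(arr, k):
--     nums = sorted(set(arr))
--     dp = {}
--     max_len = 0
--     for num in nums:
--         dp[num] = dp.get(num - k, 0) + 1
--         max_len = max(max_len, dp[num])
--     return max_len
-- ===== SOURCE B (Python) =====
-- def findLongestArithmeticProgression(arr, k):
--     s = set(arr)
--     if not s:
--         return 0
--     if k <= 0:
--         # distinct values can never repeat or decrease along a k-chain, so the best chain has length 1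
--         return 1
--     best = 0
--     for v in s:
--         t = 0
--         x = v
--         while x in s:
--             t += 1
--             x -= k
--         if t > best:
--             best = t
--     return best
-- ===== Notes on version B (the rewrite author's own statement) =====
-- stated objective: alternative
-- what changed: Replaced sort + DP-dictionary with a direct hash-set scan: k<=0 answered in closed form (1 on a nonempty set), and for k>0 each distinct value's chain length is computed by walking v, v-k, v-2k, ... through the set, taking the max.
import Mathlib
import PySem

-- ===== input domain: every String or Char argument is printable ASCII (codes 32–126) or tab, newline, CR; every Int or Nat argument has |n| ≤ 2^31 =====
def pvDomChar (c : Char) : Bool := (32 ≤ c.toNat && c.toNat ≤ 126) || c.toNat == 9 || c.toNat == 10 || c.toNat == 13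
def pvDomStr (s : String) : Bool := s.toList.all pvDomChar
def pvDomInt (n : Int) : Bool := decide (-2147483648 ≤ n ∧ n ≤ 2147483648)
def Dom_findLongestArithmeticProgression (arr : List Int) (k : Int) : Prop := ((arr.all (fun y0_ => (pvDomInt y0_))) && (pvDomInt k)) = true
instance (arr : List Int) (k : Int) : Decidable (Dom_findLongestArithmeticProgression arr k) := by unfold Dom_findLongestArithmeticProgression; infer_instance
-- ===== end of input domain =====

-- B replaces A's sort + DP dictionary by direct chain walks through the distinct-value set (and the closed-form answer 1 for k ≤ 0 on a nonempty set); objective: alternative.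

-- ===== PORT A =====
def findLongestArithmeticProgression (arr : List Int) (k : Int) : Int :=
  let nums := PySem.List.sorted (PySem.Set.ofList arr) (fun x => x) false
  (nums.foldl (fun (st : PySem.Dict Int Int × Int) num =>
      let dp := st.1.insert num (st.1.getD (num - k) 0 + 1)
      (dp, max st.2 (dp.getD num 0))) (PySem.Dict.empty, 0)).2

-- ===== PORT B =====
-- Source B's 'while x in s: t += 1; x -= k' as a fuel recursion; fuel s.length is exact where B calls it
-- (0 < k): a chain of members is strictly decreasing, hence has at most s.length elements (pvWalk_bound below).
def pvWalk (s : List Int) (k : Int) : Nat → Int → Int → Int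
  | 0, _, t => t
  | f+1, x, t => if x ∈ s then pvWalk s k f (x - k) (t + 1) else t

def findLongestArithmeticProgression_alt (arr : List Int) (k : Int) : Int :=
  let s := PySem.Set.ofList arr
  if s = [] then 0
  else if k ≤ 0 then 1
  else s.foldl (fun best v =>
      let t := pvWalk s k s.length v 0
      if t > best then t else best) 0

-- ===== PRECONDITION & SPEC =====
def Spec_findLongestArithmeticProgression (arr : List Int) (k : Int) (out : Int) : Prop := out = findLongestArithmeticProgression_alt arr k
instance (arr : List Int) (k : Int) (out : Int) : Decidable (Spec_findLongestArithmeticProgression arr k out) := by unfold Spec_findLongestArithmeticProgression; infer_instance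

-- ===== CLAIM (what is proved, stated in full; the proofs are below) =====
def Claim_equal_findLongestArithmeticProgression : Prop := ∀ (arr : List Int) (k : Int), Dom_findLongestArithmeticProgression arr k → Spec_findLongestArithmeticProgression arr k (findLongestArithmeticProgression arr k)

-- ===== LEMMAS AND PROOFS =====

theorem pvWalk_acc (s : List Int) (k : Int) : ∀ (f : Nat) (x t : Int), pvWalk s k f x t = pvWalk s k f x 0 + t := by
  intro f
  induction f with
  | zero => intro x t; simp [pvWalk]
  | succ f ih =>
    intro x t
    simp only [pvWalk]
    by_cases hx : x ∈ s
    · simp only [hx, if_true]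
      rw [ih (x - k) (t + 1), ih (x - k) (0 + 1)]
      ring
    · simp [hx]

theorem pvWalk_succ (s : List Int) (k : Int) (f : Nat) (x : Int) :
    pvWalk s k (f+1) x 0 = if x ∈ s then pvWalk s k f (x - k) 0 + 1 else 0 := by
  simp only [pvWalk]
  by_cases hx : x ∈ s
  · simp only [hx, if_true]
    rw [pvWalk_acc s k f (x - k)]
    ring
  · simp [hx]

theorem pvWalk_nonneg (s : List Int) (k : Int) : ∀ (f : Nat) (x : Int), 0 ≤ pvWalk s k f x 0 := by
  intro f
  induction f with
  | zero => intro x; simp [pvWalk]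
  | succ f ih =>
    intro x
    rw [pvWalk_succ]
    by_cases hx : x ∈ s
    · simp only [hx, if_true]; have := ih (x - k); omega
    · simp [hx]

theorem pvWalk_notmem (s : List Int) (k : Int) (f : Nat) (x : Int) (h : x ∉ s) : pvWalk s k f x 0 = 0 := by
  cases f with
  | zero => simp [pvWalk]
  | succ f => rw [pvWalk_succ]; simp [h]

theorem pvWalk_mono (s : List Int) (k : Int) : ∀ (f : Nat) (x : Int), pvWalk s k f x 0 ≤ pvWalk s k (f+1) x 0 := by
  intro f
  induction f with
  | zero =>
    intro x; rw [pvWalk_succ]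
    by_cases hx : x ∈ s
    · simp only [hx, if_true, pvWalk]
      have := pvWalk_nonneg s k 0 (x - k); omega
    · simp [hx, pvWalk]
  | succ f ih =>
    intro x
    rw [pvWalk_succ, pvWalk_succ]
    by_cases hx : x ∈ s
    · simp only [hx, if_true]
      have := ih (x - k); omega
    · simp [hx]

theorem pvWalk_mem (s : List Int) (k : Int) : ∀ (f : Nat) (x : Int) (j : Nat), (j : Int) < pvWalk s k f x 0 → x - (j : Int) * k ∈ s := by
  intro f
  induction f with
  | zero => intro x j h; simp [pvWalk] at h; omega
  | succ f ih =>
    intro x j h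
    rw [pvWalk_succ] at h
    by_cases hx : x ∈ s
    · simp only [hx, if_true] at h
      cases j with
      | zero => simpa using hx
      | succ j =>
        have hj : (j : Int) < pvWalk s k f (x - k) 0 := by push_cast at h ⊢; omega
        have heq : x - (((j + 1 : Nat) : Int)) * k = (x - k) - (j : Int) * k := by push_cast; ring
        rw [heq]
        exact ih (x - k) j hj
    · simp [hx] at h
      have := h.le; omega

theorem pvWalk_bound (s : List Int) (k : Int) (hk : 0 < k) (hnd : s.Nodup) (f : Nat) (x : Int) :
    pvWalk s k f x 0 ≤ (s.length : Int) := by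
  have hnn : 0 ≤ pvWalk s k f x 0 := pvWalk_nonneg s k f x
  have hwt : ((pvWalk s k f x 0).toNat : Int) = pvWalk s k f x 0 := Int.toNat_of_nonneg hnn
  have hinj : Function.Injective (fun j : Nat => x - (j : Int) * k) := by
    intro a b hab
    simp only at hab
    have h1 : (a : Int) * k = (b : Int) * k := by omega
    have h2 : (a : Int) = (b : Int) := mul_right_cancel₀ (ne_of_gt hk) h1
    exact_mod_cast h2
  have hnd2 : ((List.range (pvWalk s k f x 0).toNat).map (fun j : Nat => x - (j : Int) * k)).Nodup :=
    (List.nodup_range).map hinj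
  have hsub : ((List.range (pvWalk s k f x 0).toNat).map (fun j : Nat => x - (j : Int) * k)) ⊆ s := by
    intro y hy
    simp only [List.mem_map, List.mem_range] at hy
    obtain ⟨j, hj, rfl⟩ := hy
    exact pvWalk_mem s k f x j (by omega)
  have hle := (hnd2.subperm hsub).length_le
  simp only [List.length_map, List.length_range] at hle
  omega

theorem pvWalk_pred_bound (s : List Int) (k : Int) (hk : 0 < k) (hnd : s.Nodup) (f : Nat) (x : Int) (hx : x ∈ s) :
    pvWalk s k f (x - k) 0 ≤ (s.length : Int) - 1 := by
  have h := pvWalk_bound s k hk hnd (f+1) x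
  rw [pvWalk_succ] at h
  simp only [hx, if_true] at h
  omega

theorem pvWalk_stop (s : List Int) (k : Int) : ∀ (f : Nat) (x : Int), pvWalk s k f x 0 < (f : Int) → pvWalk s k (f+1) x 0 = pvWalk s k f x 0 := by
  intro f
  induction f with
  | zero => intro x h; simp [pvWalk] at h
  | succ f ih =>
    intro x h
    rw [pvWalk_succ s k (f+1) x, pvWalk_succ s k f x]
    rw [pvWalk_succ s k f x] at h
    by_cases hx : x ∈ s
    · simp only [hx, if_true] at h ⊢
      have hlt : pvWalk s k f (x - k) 0 < (f : Int) := by push_cast at h; omega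
      rw [ih (x - k) hlt]
    · simp [hx]

theorem pvWalk_step (s : List Int) (k : Int) (hk : 0 < k) (hnd : s.Nodup) (x : Int) (hx : x ∈ s) :
    pvWalk s k s.length x 0 = pvWalk s k s.length (x - k) 0 + 1 := by
  have hne : s.length ≠ 0 := by
    have := List.ne_nil_of_mem hx
    simpa [List.length_eq_zero_iff] using this
  obtain ⟨m, hm⟩ : ∃ m, s.length = m + 1 := ⟨s.length - 1, by omega⟩
  rw [hm, pvWalk_succ]
  simp only [hx, if_true]
  have key : pvWalk s k (m+1) (x - k) 0 = pvWalk s k m (x - k) 0 := by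
    by_cases hlt : pvWalk s k m (x - k) 0 < (m : Int)
    · exact pvWalk_stop s k m (x - k) hlt
    · have h1 := pvWalk_pred_bound s k hk hnd m x hx
      have h2 := pvWalk_pred_bound s k hk hnd (m+1) x hx
      have h3 := pvWalk_mono s k m (x - k)
      rw [hm] at h1 h2
      push_cast at h1 h2
      omega
  omega

theorem A_fold_pos (s : List Int) (k : Int) (hk : 0 < k) (hnd : s.Nodup) :
    ∀ (q p : List Int) (dp : PySem.Dict Int Int) (m : Int),
      (p ++ q).Pairwise (· < ·) →
      (∀ v, v ∈ s ↔ v ∈ p ++ q) →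
      (∀ v, dp.getD v 0 = if v ∈ p then pvWalk s k s.length v 0 else 0) →
      (q.foldl (fun (st : PySem.Dict Int Int × Int) num =>
          let d := st.1.insert num (st.1.getD (num - k) 0 + 1)
          (d, max st.2 (d.getD num 0))) (dp, m)).2
        = q.foldl (fun b v => max b (pvWalk s k s.length v 0)) m := by
  intro q
  induction q with
  | nil => intro p dp m _ _ _; simp
  | cons num q' ih =>
    intro p dp m hpair hiff hdp
    have hpq := hpair
    rw [List.pairwise_append] at hpq
    obtain ⟨hp, hnq, hcross⟩ := hpq
    rw [List.pairwise_cons] at hnq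
    obtain ⟨hqgt, hq'⟩ := hnq
    have hplt : ∀ a ∈ p, a < num := fun a ha => hcross a ha num (by simp)
    have hnum_s : num ∈ s := (hiff num).2 (by simp)
    have hval : dp.getD (num - k) 0 + 1 = pvWalk s k s.length num 0 := by
      by_cases hmem : num - k ∈ s
      · have hmem' : num - k ∈ p := by
          have hm := (hiff (num - k)).1 hmem
          simp only [List.mem_append, List.mem_cons] at hm
          rcases hm with h | h | h
          · exact h
          · omega
          · exact absurd (hqgt _ h) (by omega)
        rw [hdp (num - k), if_pos hmem', ← pvWalk_step s k hk hnd num hnum_s]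
      · have h0 : dp.getD (num - k) 0 = 0 := by
          rw [hdp (num - k), if_neg]
          intro hc
          exact hmem ((hiff (num - k)).2 (by simp [hc]))
        rw [h0, pvWalk_step s k hk hnd num hnum_s, pvWalk_notmem s k _ _ hmem]
    simp only [List.foldl_cons]
    have hdnum : (dp.insert num (dp.getD (num - k) 0 + 1)).getD num 0 = pvWalk s k s.length num 0 := by
      rw [PySem.Dict.getD_insert]
      simp [hval]
    have hdp' : ∀ v, (dp.insert num (dp.getD (num - k) 0 + 1)).getD v 0
        = if v ∈ p ++ [num] then pvWalk s k s.length v 0 else 0 := by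
      intro v
      rw [PySem.Dict.getD_insert]
      by_cases hv : v = num
      · subst hv; simp [hval]
      · rw [if_neg hv, hdp v]
        by_cases hvp : v ∈ p
        · rw [if_pos hvp, if_pos (by simp [hvp])]
        · rw [if_neg hvp, if_neg (by simp [hvp, hv])]
    have hpair' : ((p ++ [num]) ++ q').Pairwise (· < ·) := by simpa using hpair
    have hiff' : ∀ v, v ∈ s ↔ v ∈ (p ++ [num]) ++ q' := by
      intro v
      have h := hiff v
      simp only [List.mem_append, List.mem_cons] at h ⊢
      tauto
    have hrec := ih (p ++ [num]) (dp.insert num (dp.getD (num - k) 0 + 1))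
      (max m ((dp.insert num (dp.getD (num - k) 0 + 1)).getD num 0)) hpair' hiff' hdp'
    rw [hrec, hdnum]

theorem A_fold_nonpos (s : List Int) (k : Int) (hk : k ≤ 0) :
    ∀ (q p : List Int) (dp : PySem.Dict Int Int) (m : Int),
      (p ++ q).Pairwise (· < ·) →
      (∀ v, dp.getD v 0 ≠ 0 → v ∈ p) →
      (q.foldl (fun (st : PySem.Dict Int Int × Int) num =>
          let d := st.1.insert num (st.1.getD (num - k) 0 + 1)
          (d, max st.2 (d.getD num 0))) (dp, m)).2
        = if q = [] then m else max m 1 := by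
  intro q
  induction q with
  | nil => intro p dp m _ _; simp
  | cons num q' ih =>
    intro p dp m hpair hinv
    have hpq := hpair
    rw [List.pairwise_append] at hpq
    obtain ⟨hp, hnq, hcross⟩ := hpq
    have hplt : ∀ a ∈ p, a < num := fun a ha => hcross a ha num (by simp)
    have h0 : dp.getD (num - k) 0 = 0 := by
      by_contra h
      have := hplt _ (hinv _ h)
      omega
    have hdnum : (dp.insert num (dp.getD (num - k) 0 + 1)).getD num 0 = 1 := by
      rw [PySem.Dict.getD_insert]
      simp [h0]
    have hinv' : ∀ v, (dp.insert num (dp.getD (num - k) 0 + 1)).getD v 0 ≠ 0 → v ∈ p ++ [num] := by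
      intro v hv
      rw [PySem.Dict.getD_insert] at hv
      by_cases hvn : v = num
      · simp [hvn]
      · rw [if_neg hvn] at hv
        simp [hinv v hv]
    have hpair' : ((p ++ [num]) ++ q').Pairwise (· < ·) := by simpa using hpair
    have hrec := ih (p ++ [num]) (dp.insert num (dp.getD (num - k) 0 + 1))
      (max m ((dp.insert num (dp.getD (num - k) 0 + 1)).getD num 0)) hpair' hinv'
    simp only [List.foldl_cons]
    rw [hrec, hdnum]
    cases q' with
    | nil => simp
    | cons b q'' => simp

-- A's port equals B's port on every input (the Dom hypothesis is not needed)
theorem pv_main_eq (arr : List Int) (k : Int) :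
    findLongestArithmeticProgression arr k = findLongestArithmeticProgression_alt arr k := by
  unfold findLongestArithmeticProgression findLongestArithmeticProgression_alt
  have hperm : (PySem.List.sorted (PySem.Set.ofList arr) (fun x => x) false).Perm (PySem.Set.ofList arr) :=
    PySem.List.sorted_perm (PySem.Set.ofList arr) (fun x => x) false
  have hpair : (PySem.List.sorted (PySem.Set.ofList arr) (fun x => x) false).Pairwise (· < ·) :=
    PySem.List.sorted_ofList_pairwise_lt arr
  have hnd : (PySem.Set.ofList arr).Nodup := PySem.Set.nodup_ofList arr
  by_cases hsnil : PySem.Set.ofList arr = []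
  · have hn : PySem.List.sorted (PySem.Set.ofList arr) (fun x => x) false = [] := by
      apply List.length_eq_zero_iff.mp
      rw [hperm.length_eq, hsnil]
      rfl
    rw [hn]
    simp [hsnil]
  · have hnnil : PySem.List.sorted (PySem.Set.ofList arr) (fun x => x) false ≠ [] := by
      intro h
      apply hsnil
      apply List.length_eq_zero_iff.mp
      have hl := hperm.length_eq
      rw [h] at hl
      simpa using hl.symm
    by_cases hk : k ≤ 0
    · rw [A_fold_nonpos (PySem.Set.ofList arr) k hk
        (PySem.List.sorted (PySem.Set.ofList arr) (fun x => x) false) [] PySem.Dict.empty 0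
        (by simpa using hpair)
        (by intro v hv; exact absurd (PySem.Dict.getD_empty v 0) hv)]
      rw [if_neg hnnil, if_neg hsnil, if_pos hk]
      simp
    · push_neg at hk
      rw [A_fold_pos (PySem.Set.ofList arr) k hk hnd
        (PySem.List.sorted (PySem.Set.ofList arr) (fun x => x) false) [] PySem.Dict.empty 0
        (by simpa using hpair)
        (by intro v; simp [hperm.mem_iff])
        (by intro v; simp [PySem.Dict.getD_empty])]
      rw [if_neg hsnil, if_neg (not_le.2 hk)]
      have hcongr : (PySem.Set.ofList arr).foldl (fun best v =>
            let t := pvWalk (PySem.Set.ofList arr) k (PySem.Set.ofList arr).length v 0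
            if t > best then t else best) 0
          = (PySem.Set.ofList arr).foldl (fun b v => max b (pvWalk (PySem.Set.ofList arr) k (PySem.Set.ofList arr).length v 0)) 0 := by
        apply PySem.List.foldl_congr_mem
        intro acc x _
        by_cases h : pvWalk (PySem.Set.ofList arr) k (PySem.Set.ofList arr).length x 0 > acc
        · rw [if_pos h, max_eq_right h.le]
        · rw [if_neg h, max_eq_left (by omega)]
      rw [hcongr]
      exact List.Perm.foldl_eq
        (f := fun b v => max b (pvWalk (PySem.Set.ofList arr) k (PySem.Set.ofList arr).length v 0))
        (rcomm := ⟨fun b a1 a2 => by rw [max_right_comm]⟩) hperm 0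

-- ===== VERDICT (by name: the statement is the Claim_ definition above) =====
theorem findLongestArithmeticProgression_spec : Claim_equal_findLongestArithmeticProgression := by
  intro arr k _
  unfold Spec_findLongestArithmeticProgression
  exact pv_main_eq arr k
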